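-- pv_equiv track=rewrite | github.com/asthyeon/Algorithm | 백준/Gold/2504. 괄호의 값/괄호의 값.py | calculator
-- ===== SOURCE A (Python) =====
-- def calculator(string):
--     # 스택, 정답, 곱셈을 저장할 수
--     stack = []
--     answer = 0
--     tmp = 1
--
--     # 괄호열 계산
--     for i in range(len(string)):
--
--         # 소괄호일 때
--         if string[i] == '(':
--             stack.append(string[i])
--             tmp *= 2
--         # 닫힌 괄호를 만났을 때는 마지막 스택 제거 및 곱셈 정상화
--         elif string[i] == ')':
--             # 짝이 맞지 않는 경우 종료
--             if not stack or stack[-1] == '[':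
--                 return 0
--             # 이번이 제일 내부의 값이라면 answer 에 값 더하기
--             if string[i - 1] == '(':
--                 answer += tmp
--             # 스택 제거 및 곱셈 정상화
--             stack.pop()
--             tmp //= 2
--
--         # 대괄호일 때
--         elif string[i] == '[':
--             stack.append(string[i])
--             tmp *= 3
--         else:
--             # 짝이 맞지 않는 경우 종료
--             if not stack or stack[-1] == '(':
--                 return 0
--             # 이번이 제일 내부의 값이라면 answer 에 값 더하기
--             if string[i - 1] == '[':
--                 answer += tmp
--             # 스택 제거 및 곱셈 정상화
--             stack.pop()
--             tmp //= 3
--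
--     # 스택이 비어 있어야 정답 출력
--     if not stack:
--         return answer
--     else:
--         return 0
-- ===== SOURCE B (Python) =====
-- def calculator(string):
--     # Value stack: push None-ish markers for openers, integer partial values for
--     # closed groups; on a closer, collapse the ints above the matching marker.
--     stack = []
--     for c in string:
--         if c == '(' or c == '[':
--             stack.append(c)
--         else:
--             # ')' closes '(' with factor 2; any other char behaves as ']' (factor 3)
--             marker, mult = ('(', 2) if c == ')' else ('[', 3)
--             inner = 0
--             while stack and not isinstance(stack[-1], str):
--                 inner += stack.pop()
--             if not stack or stack[-1] != marker:
--                 return 0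
--             stack.pop()
--             stack.append(mult if inner == 0 else mult * inner)
--     if any(isinstance(e, str) for e in stack):
--         return 0
--     return sum(stack)
-- ===== Notes on version B (the rewrite author's own statement) =====
-- stated objective: alternative
-- what changed: B replaces A's char-stack + running multiplier + immediate answer accumulation with a value stack: partial integer values of closed groups are pushed and collapsed on each closer, and the final answer is the sum of the stack.
import Mathlib
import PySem

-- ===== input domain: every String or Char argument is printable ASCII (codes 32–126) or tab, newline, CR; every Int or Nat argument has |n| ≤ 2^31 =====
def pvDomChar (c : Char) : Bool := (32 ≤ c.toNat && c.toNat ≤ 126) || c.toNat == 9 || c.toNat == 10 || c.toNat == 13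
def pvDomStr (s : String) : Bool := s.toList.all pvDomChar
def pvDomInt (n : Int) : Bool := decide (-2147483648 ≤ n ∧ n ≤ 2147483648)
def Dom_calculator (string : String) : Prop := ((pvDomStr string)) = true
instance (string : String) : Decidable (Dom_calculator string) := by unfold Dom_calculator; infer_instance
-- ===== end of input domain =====

-- B: value-stack algorithm (push partial group values, collapse on close, sum at end)
-- instead of A's char stack + running multiplier + immediate accumulation; same O(n) cost.


-- ===== PORT A =====
-- one loop-body step of A; prev = string[i-1], c = string[i]; state none = early 'return 0'
def pvStepA' (prev c : Char) (st : Option (List Char × Int × Int)) :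
    Option (List Char × Int × Int) :=
  match st with
  | none => none
  | some (stack, answer, tmp) =>
    if c = '(' then some (c :: stack, answer, tmp * 2)
    else if c = ')' then
      if stack = [] ∨ stack.head? = some '[' then none
      else
        some (stack.tail, (if prev = '(' then answer + tmp else answer),
              PySem.Int.floordiv tmp 2)
    else if c = '[' then some (c :: stack, answer, tmp * 3)
    else
      if stack = [] ∨ stack.head? = some '(' then none
      else
        some (stack.tail, (if prev = '[' then answer + tmp else answer),
              PySem.Int.floordiv tmp 3)

def pvStepA (s : List Char) (st : Option (List Char × Int × Int)) (i : Int) :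
    Option (List Char × Int × Int) :=
  pvStepA' (PySem.List.pyGetD s (i - 1) ' ') (PySem.List.pyGetD s i ' ') st

def calculator (string : String) : Int :=
  match (PySem.List.pyRange 0 (string.toList.length : Int) 1).foldl
      (pvStepA string.toList) (some ([], 0, 1)) with
  | none => 0
  | some (stack, answer, _) => if stack = [] then answer else 0

-- ===== PORT B =====
-- pop the integers above the first marker, summing them; none = mismatch (return 0)
def pvPopB (marker : Char) : List (Char ⊕ Int) → Int → Option (Int × List (Char ⊕ Int))
  | [], _ => none
  | Sum.inl m :: rest, acc => if m = marker then some (acc, rest) else none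
  | Sum.inr v :: rest, acc => pvPopB marker rest (acc + v)

def pvStepB (st : Option (List (Char ⊕ Int))) (c : Char) : Option (List (Char ⊕ Int)) :=
  match st with
  | none => none
  | some stack =>
    if c = '(' ∨ c = '[' then some (Sum.inl c :: stack)
    else
      let p : Char × Int := if c = ')' then ('(', 2) else ('[', 3)
      match pvPopB p.1 stack 0 with
      | none => none
      | some (inner, rest) =>
          some (Sum.inr (if inner = 0 then p.2 else p.2 * inner) :: rest)

def calculator_alt (string : String) : Int :=
  match string.toList.foldl pvStepB (some []) with
  | none => 0
  | some stack =>
    if stack.any (fun e => e.isLeft) then 0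
    else (stack.map (fun e => Sum.elim (fun _ => (0 : Int)) id e)).sum

-- ===== PRECONDITION & SPEC =====
def Spec_calculator (string : String) (out : Int) : Prop := out = calculator_alt string
instance (string : String) (out : Int) : Decidable (Spec_calculator string out) := by unfold Spec_calculator; infer_instance

-- ===== CLAIM (what is proved, stated in full; the proofs are below) =====
def Claim_equal_calculator : Prop := ∀ (string : String), Dom_calculator string → Spec_calculator string (calculator string)

-- ===== LEMMAS AND PROOFS =====

-- A's loop rewritten as structural recursion over the characters, carrying the previous char
def pvGo : Char → List Char → Option (List Char × Int × Int) → Option (List Char × Int × Int)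
  | _, [], st => st
  | prev, c :: cs, st => pvGo c cs (pvStepA' prev c st)

def pvMarks : List (Char ⊕ Int) → List Char
  | [] => []
  | Sum.inl m :: r => m :: pvMarks r
  | Sum.inr _ :: r => pvMarks r

def pvMul (m : Char) : Int := if m = '(' then 2 else 3

def pvOther (m : Char) : Char := if m = '(' then '[' else '('

def pvProd : List (Char ⊕ Int) → Int
  | [] => 1
  | Sum.inl m :: r => pvMul m * pvProd r
  | Sum.inr _ :: r => pvProd r

def pvWsum : List (Char ⊕ Int) → Int
  | [] => 0
  | Sum.inl _ :: r => pvWsum r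
  | Sum.inr v :: r => v * pvProd r + pvWsum r

-- the loop invariant: B's stack determines A's whole state
def pvRel (prev : Char) (a : Option (List Char × Int × Int))
    (b : Option (List (Char ⊕ Int))) : Prop :=
  (a = none ∧ b = none) ∨
  ∃ sb, a = some (pvMarks sb, pvWsum sb, pvProd sb) ∧ b = some sb ∧
    (∀ m ∈ pvMarks sb, m = '(' ∨ m = '[') ∧
    (∀ v : Int, Sum.inr v ∈ sb → 0 < v) ∧
    (sb = [] ∨ ((prev = '(' ↔ sb.head? = some (Sum.inl '(')) ∧
                (prev = '[' ↔ sb.head? = some (Sum.inl '['))))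

lemma pvPopB_none_iff (m : Char) : ∀ (sb : List (Char ⊕ Int)) (acc : Int),
    pvPopB m sb acc = none ↔ (pvMarks sb).head? ≠ some m := by
  intro sb
  induction sb with
  | nil => intro acc; simp [pvPopB, pvMarks]
  | cons e r ih =>
    intro acc
    cases e with
    | inl m' => by_cases h : m' = m <;> simp [pvPopB, pvMarks, h]
    | inr v => simpa [pvPopB, pvMarks] using ih (acc + v)

lemma pvPopB_some (m : Char) : ∀ (sb : List (Char ⊕ Int)) (acc inner : Int)
    (rest : List (Char ⊕ Int)),
    (∀ v : Int, Sum.inr v ∈ sb → 0 < v) →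
    pvPopB m sb acc = some (inner, rest) →
    pvMarks sb = m :: pvMarks rest ∧
    pvProd sb = pvMul m * pvProd rest ∧
    pvWsum sb = (inner - acc) * (pvMul m * pvProd rest) + pvWsum rest ∧
    acc ≤ inner ∧
    (inner = acc ↔ sb.head? = some (Sum.inl m)) ∧
    (∀ v : Int, Sum.inr v ∈ rest → 0 < v) := by
  intro sb
  induction sb with
  | nil => intro acc inner rest _ h; simp [pvPopB] at h
  | cons e r ih =>
    intro acc inner rest hpos h
    cases e with
    | inl m' =>
      by_cases hm : m' = m
      · simp [pvPopB, hm] at h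
        obtain ⟨h1, h2⟩ := h
        subst h1 h2 hm
        exact ⟨by simp [pvMarks], by simp [pvProd], by simp [pvWsum], le_refl _,
          by simp, fun v hv => hpos v (List.mem_cons_of_mem _ hv)⟩
      · simp [pvPopB, hm] at h
    | inr v =>
      have hv : 0 < v := hpos v (by simp)
      have h' : pvPopB m r (acc + v) = some (inner, rest) := by simpa [pvPopB] using h
      obtain ⟨h1, h2, h3, h4, h5, h6⟩ :=
        ih (acc + v) inner rest (fun w hw => hpos w (List.mem_cons_of_mem _ hw)) h'
      refine ⟨by simpa [pvMarks] using h1, by simpa [pvProd] using h2, ?_, by omega, ?_, h6⟩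
      · simp only [pvWsum, h2, h3]; ring
      · constructor
        · intro he; omega
        · intro he; simp at he

lemma pvMul_pos (m : Char) : 0 < pvMul m := by unfold pvMul; split <;> norm_num

-- the closer step, parametric in the matching marker m (')' ↦ '(', anything else ↦ '[')
lemma pvClose_rel (m prev c : Char) (hm : m = '(' ∨ m = '[')
    (hco : c ≠ '(' ∧ c ≠ '[')
    (sb : List (Char ⊕ Int))
    (hwf : ∀ x ∈ pvMarks sb, x = '(' ∨ x = '[')
    (hpos : ∀ v : Int, Sum.inr v ∈ sb → 0 < v)
    (hhead : sb = [] ∨ ((prev = '(' ↔ sb.head? = some (Sum.inl '(')) ∧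
                (prev = '[' ↔ sb.head? = some (Sum.inl '[')))) :
    pvRel c
      (if pvMarks sb = [] ∨ (pvMarks sb).head? = some (pvOther m) then none
       else some ((pvMarks sb).tail,
                  (if prev = m then pvWsum sb + pvProd sb else pvWsum sb),
                  PySem.Int.floordiv (pvProd sb) (pvMul m)))
      (match pvPopB m sb 0 with
       | none => none
       | some (inner, rest) =>
           some (Sum.inr (if inner = 0 then pvMul m else pvMul m * inner) :: rest)) := by
  by_cases hnil : pvMarks sb = []
  · have hpop : pvPopB m sb 0 = none := by
      rw [pvPopB_none_iff]; simp [hnil]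
    left
    simp [hnil, hpop]
  by_cases hoth : (pvMarks sb).head? = some (pvOther m)
  · have hpop : pvPopB m sb 0 = none := by
      rw [pvPopB_none_iff, hoth]
      rcases hm with h | h <;> subst h <;> simp [pvOther]
    left
    simp [hoth, hpop]
  -- the first marker must be m itself
  obtain ⟨m', ms, hms⟩ := List.exists_cons_of_ne_nil hnil
  have hm' : m' = m := by
    have hmem : m' ∈ pvMarks sb := by rw [hms]; simp
    have := hwf m' hmem
    rcases hm with h | h <;> subst h <;> rcases this with h' | h' <;>
      simp_all [pvOther]
  rw [hm'] at hms
  have hpop : ¬ pvPopB m sb 0 = none := by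
    rw [pvPopB_none_iff, hms]; simp
  obtain ⟨⟨inner, rest⟩, hpopeq⟩ := Option.ne_none_iff_exists'.mp hpop
  obtain ⟨h1, h2, h3, h4, h5, h6⟩ := pvPopB_some m sb 0 inner rest hpos hpopeq
  have hsbne : sb ≠ [] := by
    intro h; rw [h] at hms; simp [pvMarks] at hms
  have hheads := hhead.resolve_left hsbne
  -- prev = m ↔ inner = 0
  have hprev : prev = m ↔ inner = 0 := by
    rcases hm with h | h <;> subst h
    · rw [hheads.1, ← h5]
    · rw [hheads.2, ← h5]
  have hdiv : PySem.Int.floordiv (pvProd sb) (pvMul m) = pvProd rest := by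
    rw [h2, PySem.Int.floordiv_eq_ediv_of_pos (pvMul_pos m)]
    exact Int.mul_ediv_cancel_left _ (ne_of_gt (pvMul_pos m))
  have hifne : ¬ (pvMarks sb = [] ∨ (pvMarks sb).head? = some (pvOther m)) := by
    push Not; exact ⟨hnil, hoth⟩
  right
  refine ⟨Sum.inr (if inner = 0 then pvMul m else pvMul m * inner) :: rest, ?_, ?_, ?_, ?_, ?_⟩
  · rw [if_neg hifne]
    have hma : pvMarks (Sum.inr (if inner = 0 then pvMul m else pvMul m * inner) :: rest)
        = (pvMarks sb).tail := by rw [h1]; simp [pvMarks]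
    have hpr : pvProd (Sum.inr (if inner = 0 then pvMul m else pvMul m * inner) :: rest)
        = pvProd rest := by simp [pvProd]
    have hws : (if prev = m then pvWsum sb + pvProd sb else pvWsum sb)
        = pvWsum (Sum.inr (if inner = 0 then pvMul m else pvMul m * inner) :: rest) := by
      by_cases hz : inner = 0
      · rw [if_pos (hprev.mpr hz)]
        subst hz
        simp only [pvWsum, h2, h3]
        norm_num
        ring
      · rw [if_neg (fun h => hz (hprev.mp h))]
        simp only [pvWsum, if_neg hz, h3]
        ring
    rw [hma, hpr, hdiv, ← hws]
  · rw [hpopeq]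
  · intro x hx
    apply hwf
    rw [h1]
    simp only [pvMarks] at hx ⊢
    exact List.mem_cons_of_mem _ hx
  · intro v hv
    rcases List.mem_cons.mp hv with h | h
    · have hvv : v = if inner = 0 then pvMul m else pvMul m * inner := by
        simpa using h
      subst hvv
      by_cases hz : inner = 0
      · simpa [hz] using pvMul_pos m
      · rw [if_neg hz]
        exact mul_pos (pvMul_pos m) (by omega)
    · exact h6 v h
  · right
    constructor <;> constructor <;> intro h <;> simp_all [hco.1, hco.2]

lemma pvStep_rel (prev c : Char) (a : Option (List Char × Int × Int))
    (b : Option (List (Char ⊕ Int))) (h : pvRel prev a b) :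
    pvRel c (pvStepA' prev c a) (pvStepB b c) := by
  rcases h with ⟨ha, hb⟩ | ⟨sb, ha, hb, hwf, hpos, hhead⟩
  · subst ha hb; left; simp [pvStepA', pvStepB]
  subst ha hb
  by_cases hc1 : c = '('
  · subst hc1
    right
    refine ⟨Sum.inl '(' :: sb, ?_, ?_, ?_, ?_, ?_⟩
    · simp [pvStepA', pvMarks, pvProd, pvWsum, pvMul, mul_comm]
    · simp [pvStepB]
    · intro m hm
      rcases (by simpa [pvMarks] using hm : m = '(' ∨ m ∈ pvMarks sb) with h | h
      · exact Or.inl h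
      · exact hwf m h
    · intro v hv; exact hpos v (by simpa using hv)
    · right; constructor <;> simp
  by_cases hc3 : c = '['
  · subst hc3
    right
    refine ⟨Sum.inl '[' :: sb, ?_, ?_, ?_, ?_, ?_⟩
    · simp [pvStepA', pvMarks, pvProd, pvWsum, pvMul, hc1, mul_comm]
    · simp [pvStepB]
    · intro m hm
      rcases (by simpa [pvMarks] using hm : m = '[' ∨ m ∈ pvMarks sb) with h | h
      · exact Or.inr h
      · exact hwf m h
    · intro v hv; exact hpos v (by simpa using hv)
    · right; constructor <;> simp [hc1]
  · by_cases hc2 : c = ')'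
    · subst hc2
      have hA : pvStepA' prev ')' (some (pvMarks sb, pvWsum sb, pvProd sb))
          = (if pvMarks sb = [] ∨ (pvMarks sb).head? = some (pvOther '(') then none
             else some ((pvMarks sb).tail,
                        (if prev = '(' then pvWsum sb + pvProd sb else pvWsum sb),
                        PySem.Int.floordiv (pvProd sb) (pvMul '('))) := by
        simp [pvStepA', pvOther, pvMul]
      have hB : pvStepB (some sb) ')'
          = (match pvPopB '(' sb 0 with
             | none => none
             | some (inner, rest) =>
                 some (Sum.inr (if inner = 0 then pvMul '(' else pvMul '(' * inner) :: rest)) := by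
        simp [pvStepB, pvMul]
      rw [hA, hB]
      exact pvClose_rel '(' prev ')' (Or.inl rfl) (by decide) sb hwf hpos hhead
    · have hA : pvStepA' prev c (some (pvMarks sb, pvWsum sb, pvProd sb))
          = (if pvMarks sb = [] ∨ (pvMarks sb).head? = some (pvOther '[') then none
             else some ((pvMarks sb).tail,
                        (if prev = '[' then pvWsum sb + pvProd sb else pvWsum sb),
                        PySem.Int.floordiv (pvProd sb) (pvMul '['))) := by
        simp [pvStepA', pvOther, pvMul, hc1, hc2, hc3]
      have hB : pvStepB (some sb) c
          = (match pvPopB '[' sb 0 with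
             | none => none
             | some (inner, rest) =>
                 some (Sum.inr (if inner = 0 then pvMul '[' else pvMul '[' * inner) :: rest)) := by
        simp [pvStepB, pvMul, hc1, hc2, hc3]
      rw [hA, hB]
      exact pvClose_rel '[' prev c (Or.inr rfl) ⟨hc1, hc3⟩ sb hwf hpos hhead

lemma pvLoop_rel : ∀ (cs : List Char) (prev : Char) (a : Option (List Char × Int × Int))
    (b : Option (List (Char ⊕ Int))), pvRel prev a b →
    ∃ prev', pvRel prev' (pvGo prev cs a) (cs.foldl pvStepB b) := by
  intro cs
  induction cs with
  | nil => intro prev a b h; exact ⟨prev, h⟩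
  | cons c cs ih =>
    intro prev a b h
    exact ih c _ _ (pvStep_rel prev c a b h)

-- bridging A's index loop with the prev-carrying char recursion
lemma pvBridge (s : List Char) : ∀ (n k : Nat) (a : Option (List Char × Int × Int)),
    k ≤ s.length → n = s.length - k →
    (PySem.List.pyRange (k : Int) (s.length : Int) 1).foldl (pvStepA s) a
      = pvGo (PySem.List.pyGetD s ((k : Int) - 1) ' ') (s.drop k) a := by
  intro n
  induction n with
  | zero =>
    intro k a hk hn
    have hk' : k = s.length := by omega
    subst hk'
    rw [PySem.List.pyRange_one_eq_nil (le_refl _), List.drop_of_length_le (le_refl _)]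
    simp [pvGo]
  | succ n ih =>
    intro k a hk hn
    have hklt : k < s.length := by omega
    rw [PySem.List.pyRange_one_cons (by exact_mod_cast hklt)]
    rw [List.drop_eq_getElem_cons hklt]
    simp only [List.foldl_cons, pvGo]
    have hstep : pvStepA s a (k : Int)
        = pvStepA' (PySem.List.pyGetD s ((k : Int) - 1) ' ') s[k] a := by
      unfold pvStepA
      congr 1
      rw [PySem.List.pyGetD_natCast, List.getD_eq_getElem?_getD, List.getElem?_eq_getElem hklt]
      rfl
    rw [hstep]
    have hcast : ((k : Int) + 1) = ((k + 1 : Nat) : Int) := by push_cast; ring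
    rw [hcast, ih (k + 1) _ (by omega) (by omega)]
    congr 1
    have : ((k + 1 : Nat) : Int) - 1 = ((k : Nat) : Int) := by push_cast; ring
    rw [this, PySem.List.pyGetD_natCast, List.getD_eq_getElem?_getD, List.getElem?_eq_getElem hklt]
    rfl

lemma pvMarks_nil_iff (sb : List (Char ⊕ Int)) :
    pvMarks sb = [] ↔ sb.any (fun e => e.isLeft) = false := by
  induction sb with
  | nil => simp [pvMarks]
  | cons e r ih => cases e <;> simp [pvMarks, ih]

lemma pvProd_of_no_marks (sb : List (Char ⊕ Int)) (h : pvMarks sb = []) : pvProd sb = 1 := by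
  induction sb with
  | nil => simp [pvProd]
  | cons e r ih =>
    cases e with
    | inl m => simp [pvMarks] at h
    | inr v =>
      simp only [pvMarks] at h
      simp [pvProd, ih h]

lemma pvWsum_of_no_marks (sb : List (Char ⊕ Int)) (h : pvMarks sb = []) :
    pvWsum sb = (sb.map (fun e => Sum.elim (fun _ => (0 : Int)) id e)).sum := by
  induction sb with
  | nil => simp [pvWsum]
  | cons e r ih =>
    cases e with
    | inl m => simp [pvMarks] at h
    | inr v =>
      simp only [pvMarks] at h
      simp [pvWsum, ih h, pvProd_of_no_marks r h]

-- ===== VERDICT (by name: the statement is the Claim_ definition above) =====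
theorem calculator_spec : Claim_equal_calculator := by
  intro string _
  unfold Spec_calculator calculator calculator_alt
  have hinit : pvRel (PySem.List.pyGetD string.toList ((0 : Int) - 1) ' ')
      (some ([], 0, 1)) (some []) := by
    right
    exact ⟨[], by simp [pvMarks, pvWsum, pvProd], rfl, by simp [pvMarks], by simp, Or.inl rfl⟩
  have hb := pvBridge string.toList (string.toList.length - 0) 0 (some ([], 0, 1))
    (Nat.zero_le _) rfl
  simp only [Nat.cast_zero] at hb
  rw [List.drop_zero] at hb
  obtain ⟨prev', hrel⟩ := pvLoop_rel string.toList _ _ _ hinit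
  rw [hb]
  rcases hrel with ⟨ha, hbn⟩ | ⟨sb, ha, hbs, _, _, _⟩
  · rw [ha, hbn]
  · rw [ha, hbs]
    dsimp only
    by_cases hnil : pvMarks sb = []
    · rw [if_pos hnil]
      have := (pvMarks_nil_iff sb).mp hnil
      simp only [this, Bool.false_eq_true, if_false]
      exact pvWsum_of_no_marks sb hnil
    · rw [if_neg hnil]
      have : sb.any (fun e => e.isLeft) = true := by
        rcases h : sb.any (fun e => e.isLeft) with _ | _
        · exact absurd ((pvMarks_nil_iff sb).mpr h) hnil
        · rfl
      simp [this]
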